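-- pv_equiv track=rewrite | github.com/closeio/tasktiger | tasktiger/_internal.py | dotted_parts
-- ===== SOURCE A (Python) =====
-- def dotted_parts(s):
--     """
--     For a string "a.b.c", yields "a", "a.b", "a.b.c".
--     """
--     idx = -1
--     while s:
--         idx = s.find(".", idx + 1)
--         if idx == -1:
--             yield s
--             break
--         yield s[:idx]
-- ===== SOURCE B (Python) =====
-- def dotted_parts(s):
--     """
--     For a string "a.b.c", yields "a", "a.b", "a.b.c".
--     """
--     if s:
--         yield from _dotted_parts_rec(s)
--
--
-- def _dotted_parts_rec(s):
--     # Recursive decomposition at the first dot: yield the head, then every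
--     # prefix of the tail with the head and a dot glued in front.
--     head, sep, tail = s.partition(".")
--     yield head
--     if sep:
--         for p in _dotted_parts_rec(tail):
--             yield head + "." + p
-- ===== Notes on version B (the rewrite author's own statement) =====
-- stated objective: alternative
-- what changed: Replaces the iterative find-with-start-index loop that slices each prefix out of the whole string by a recursion that partitions the string at its first dot, yields the part before the dot, and glues that part plus a dot onto every prefix produced recursively from the tail.
import Mathlib
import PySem

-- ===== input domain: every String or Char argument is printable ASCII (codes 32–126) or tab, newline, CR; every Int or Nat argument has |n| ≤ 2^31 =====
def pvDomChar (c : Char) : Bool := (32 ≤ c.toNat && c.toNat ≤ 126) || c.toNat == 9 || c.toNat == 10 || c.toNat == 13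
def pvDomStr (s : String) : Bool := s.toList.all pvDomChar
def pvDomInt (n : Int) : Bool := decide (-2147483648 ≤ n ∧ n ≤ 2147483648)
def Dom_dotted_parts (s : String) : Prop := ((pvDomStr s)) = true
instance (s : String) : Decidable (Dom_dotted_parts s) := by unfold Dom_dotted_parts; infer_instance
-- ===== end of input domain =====

-- B replaces A's iterative find-with-start-index loop by a recursion that splits
-- at the first dot and glues the head part and a dot onto the recursively built tail prefixes
-- (objective: alternative decomposition). Return values only; A is a generator.

-- ===== PORT A =====
-- the while loop of A: `start` is idx+1; fuel bounds the iteration count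
-- (each found index is ≥ start and < length, so length+1 iterations suffice)
def dottedGoA (cs : List Char) : Nat → Nat → List String
  | 0, _ => []
  | fuel+1, start =>
    let i := PySem.Chars.findFrom cs ['.'] (start : Int) none
    if i = -1 then [String.ofList cs]
    else String.ofList (PySem.List.slice cs none (some i)) :: dottedGoA cs fuel (i.toNat + 1)

def dotted_parts (s : String) : List String :=
  if s.toList = [] then [] else dottedGoA s.toList (s.toList.length + 1) 0

-- ===== PORT B =====
-- s.partition(".") is ported by hand (PySem has no partition): find the first
-- '.', split as take/drop; exact for a one-character separator.
def dottedPartsRec (cs : List Char) : List (List Char) :=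
  let i := PySem.Chars.find cs ['.']
  if h : i = -1 then [cs]
  else
    cs.take i.toNat ::
      (dottedPartsRec (cs.drop (i.toNat + 1))).map (fun p => cs.take i.toNat ++ '.' :: p)
termination_by cs.length
decreasing_by
  have h0 : (0:Int) ≤ PySem.Chars.find cs ['.'] :=
    (PySem.Chars.find_nonneg_iff _ _).mpr ((PySem.Chars.find_ne_neg_one_iff _ _).mp h)
  have hlen : PySem.Chars.find cs ['.'] ≤ (cs.length : Int) := PySem.Chars.find_le_length cs ['.']
  have hne : cs ≠ [] := by
    intro hnil
    have := (PySem.Chars.find_ne_neg_one_iff _ _).mp h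
    subst hnil
    simp at this
  have : 0 < cs.length := List.length_pos_iff.mpr hne
  simp only [List.length_drop]
  omega

def dotted_parts_alt (s : String) : List String :=
  if s = "" then [] else (dottedPartsRec s.toList).map String.ofList

-- ===== PRECONDITION & SPEC =====
def Spec_dotted_parts (s : String) (out : List String) : Prop := out = dotted_parts_alt s
instance (s : String) (out : List String) : Decidable (Spec_dotted_parts s out) := by unfold Spec_dotted_parts; infer_instance

-- ===== CLAIM (what is proved, stated in full; the proofs are below) =====
def Claim_equal_dotted_parts : Prop := ∀ (s : String), Dom_dotted_parts s → Spec_dotted_parts s (dotted_parts s)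

-- ===== LEMMAS AND PROOFS =====

-- A's loop from position `start` produces exactly B's recursive prefixes of
-- the suffix `cs.drop start`, each with the fixed prefix `cs.take start` glued on.
theorem dottedGoA_eq (cs : List Char) (fuel start : Nat)
    (hs : start ≤ cs.length) (hf : cs.length - start < fuel) :
    dottedGoA cs fuel start =
      (dottedPartsRec (cs.drop start)).map (fun p => String.ofList (cs.take start ++ p)) := by
  induction fuel generalizing start with
  | zero => omega
  | succ fuel ih =>
    rw [dottedGoA]
    rw [PySem.Chars.findFrom_natCast cs ['.'] start hs]
    by_cases hfind : PySem.Chars.find (cs.drop start) ['.'] = -1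
    · simp only [hfind]
      rw [dottedPartsRec]
      simp only [hfind, dite_eq_ite]
      have hsplit : String.ofList (cs.take start ++ cs.drop start) =
          String.ofList (cs.take start) ++ String.ofList (cs.drop start) :=
        String.ofList_append
      rw [List.take_append_drop] at hsplit
      rw [hsplit]
      simp
    · simp only [if_neg hfind]
      have h0 : (0:Int) ≤ PySem.Chars.find (cs.drop start) ['.'] :=
        (PySem.Chars.find_nonneg_iff _ _).mpr ((PySem.Chars.find_ne_neg_one_iff _ _).mp hfind)
      set k : Nat := (PySem.Chars.find (cs.drop start) ['.']).toNat with hk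
      have hkcast : PySem.Chars.find (cs.drop start) ['.'] = (k : Int) := by
        rw [hk]; exact (Int.toNat_of_nonneg h0).symm
      have hsum : (↑start + PySem.Chars.find (cs.drop start) ['.'] : Int) ≠ -1 := by omega
      -- find points at a '.'
      have hspec := (PySem.Chars.find_spec h0).1
      rw [hkcast] at hspec
      simp only [Int.toNat_natCast, List.drop_drop] at hspec
      obtain ⟨t, ht⟩ := hspec
      have ht' : cs.drop (start + k) = '.' :: t := ht.symm
      have htt : cs.drop (start + k + 1) = t := by
        rw [← List.tail_drop, ht']; rfl
      have hdot : cs.drop (start + k) = '.' :: cs.drop (start + k + 1) := by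
        rw [ht', htt]
      have hklt : start + k < cs.length := by
        have h1 : cs.drop (start + k) ≠ [] := by rw [hdot]; simp
        have h2 := List.length_pos_iff.mpr h1
        simp only [List.length_drop] at h2
        omega
      rw [if_neg hsum]
      have htn : (↑start + PySem.Chars.find (cs.drop start) ['.'] : Int).toNat = start + k := by
        rw [hkcast]; omega
      rw [PySem.List.slice_to cs (by omega : (0:Int) ≤ ↑start + PySem.Chars.find (cs.drop start) ['.'])]
      rw [htn]
      rw [ih (start + k + 1) (by omega) (by omega)]
      -- right-hand side: unfold B's recursion on the suffix
      conv_rhs => rw [dottedPartsRec]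
      rw [dif_neg hfind]
      simp only [hkcast, Int.toNat_natCast]
      simp only [List.map_cons, List.map_map, List.drop_drop]
      have harith : start + (k + 1) = start + k + 1 := by ring
      rw [harith]
      refine congrArg₂ List.cons ?_ ?_
      · -- heads agree: take (start+k) cs = take start cs ++ take k (drop start cs)
        rw [List.take_add]
      · -- tails agree
        apply List.map_congr_left
        intro p _
        simp only [Function.comp_apply]
        congr 1
        -- take (start+k+1) cs ++ p = take start cs ++ (take k (drop start cs) ++ '.' :: p)
        have h1 : cs.take (start + k + 1) = cs.take (start + k) ++ ['.'] := by
          rw [List.take_add, hdot]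
          rfl
        rw [h1, List.take_add]
        simp

theorem toList_eq_nil_iff_empty (s : String) : s.toList = [] ↔ s = "" := by
  constructor
  · intro h
    have := congrArg String.ofList h
    simpa using this
  · intro h; subst h; rfl

-- ===== VERDICT (by name: the statement is the Claim_ definition above) =====
theorem dotted_parts_spec : Claim_equal_dotted_parts := by
  intro s _
  unfold Spec_dotted_parts dotted_parts dotted_parts_alt
  by_cases h : s.toList = []
  · rw [if_pos h, if_pos ((toList_eq_nil_iff_empty s).mp h)]
  · rw [if_neg h, if_neg (fun he => h ((toList_eq_nil_iff_empty s).mpr he))]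
    rw [dottedGoA_eq s.toList (s.toList.length + 1) 0 (by omega) (by omega)]
    simp
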